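-- pv_equiv track=rewrite | github.com/pypi-data/pypi-mirror-99 | packages/cubicweb-elasticsearch/cubicweb-elasticsearch-0.10.0.tar.gz/cubicweb-elasticsearch-0.10.0/cubicweb_elasticsearch/search_helpers.py | is_simple_query_string
-- ===== SOURCE A (Python) =====
-- SIMPLE_QUERY_OPERATORS = "|+-\"()*~"
--
-- def is_simple_query_string(query):
--     """
--     Define if the query contains any of operators supported by simple_query_string
--
--     query:
--         text of the query to be composed (can contain quotes)
--
--     In ES the simple_query_string query supports the following operators:
--
--     + signifies AND operation
--     | signifies OR operation
--     - negates a single token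
--     " wraps a number of tokens to signify a phrase for searching
--     * at the end of a term signifies a prefix query
--     ( and ) signify precedence
--     ~N after a word signifies edit distance (fuzziness)
--     ~N after a phrase signifies slop amount
--
--     https://www.elastic.co/guide/en/elasticsearch/reference/7.9/query-dsl-simple-query-string-query.html
-- """
--     # for all operators except "-", if it appears, then we assume it is a simple query
--     for operator in SIMPLE_QUERY_OPERATORS.replace("-", ""):
--         if operator in query:
--             return True
--
--     # in the case of the "-" operator, we accept it only if it is at the beginning of the query
--     # or after a space or an operator
--     # queries like "mont-saint-michel" should not be regarded as simple_query_string
--     if query.startswith("-"):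
--         return True
--
--     if " -" in query:
--         return True
--
--     return False
-- ===== SOURCE B (Python) =====
-- SIMPLE_QUERY_OPERATORS = "|+-\"()*~"
--
-- def is_simple_query_string(query):
--     """Single pass: any non-'-' operator char triggers True; '-' triggers True
--     only at the start of the query or right after a space."""
--     ops = set('|+"()*~')
--     prev = None
--     for c in query:
--         if c in ops:
--             return True
--         if c == '-' and (prev is None or prev == ' '):
--             return True
--         prev = c
--     return False
-- ===== Notes on version B (the rewrite author's own statement) =====
-- stated objective: alternative
-- what changed: Replaces A's seven separate substring scans plus the two minus-sign checks with one single pass over the string that keeps only the previous character and returns early on the first operator found.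
import Mathlib
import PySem

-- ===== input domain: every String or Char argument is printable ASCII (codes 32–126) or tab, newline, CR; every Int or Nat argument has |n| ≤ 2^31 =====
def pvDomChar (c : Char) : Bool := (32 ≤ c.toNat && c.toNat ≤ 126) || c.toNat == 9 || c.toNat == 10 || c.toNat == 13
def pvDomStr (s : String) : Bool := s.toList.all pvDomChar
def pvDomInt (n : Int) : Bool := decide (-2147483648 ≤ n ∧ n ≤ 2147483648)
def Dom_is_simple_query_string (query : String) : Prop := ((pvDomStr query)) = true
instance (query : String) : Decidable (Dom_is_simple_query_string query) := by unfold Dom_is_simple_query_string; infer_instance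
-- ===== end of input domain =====

-- B replaces A's seven separate substring scans plus the two minus-sign checks with one
-- single pass over the string keeping only the previous character (objective: alternative).

-- ===== PORT A =====
-- the loop 'for operator in SIMPLE_QUERY_OPERATORS.replace("-", ""): if operator in query: return True'
-- followed by the two '-' checks and 'return False'
def isqA_loop (query : String) : List Char → Bool
  | [] =>
      if PySem.Str.startswith query "-" then true
      else if PySem.Str.isIn " -" query then true
      else false
  | op :: rest =>
      if PySem.Str.isIn (String.ofList [op]) query then true
      else isqA_loop query rest

def is_simple_query_string (query : String) : Bool :=
  isqA_loop query (PySem.Str.replace "|+-\"()*~" "-" "").toList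

-- ===== PORT B =====
-- single pass with the previous character as the only state
def isqB_loop (prev : Option Char) : List Char → Bool
  | [] => false
  | c :: rest =>
      if (['|', '+', '"', '(', ')', '*', '~'] : List Char).contains c then true
      else if c = '-' && (prev == none || prev == some ' ') then true
      else isqB_loop (some c) rest

def is_simple_query_string_alt (query : String) : Bool :=
  isqB_loop none query.toList

-- ===== PRECONDITION & SPEC =====
def Spec_is_simple_query_string (query : String) (out : Bool) : Prop := out = is_simple_query_string_alt query
instance (query : String) (out : Bool) : Decidable (Spec_is_simple_query_string query out) := by unfold Spec_is_simple_query_string; infer_instance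

-- ===== CLAIM (what is proved, stated in full; the proofs are below) =====
def Claim_equal_is_simple_query_string : Prop := ∀ (query : String), Dom_is_simple_query_string query → Spec_is_simple_query_string query (is_simple_query_string query)

-- ===== LEMMAS AND PROOFS =====

-- head of the list is '-'
def headDash : List Char → Bool
  | [] => false
  | c :: _ => c = '-'

-- [' ', '-'] occurs somewhere in the list
def spaceDash : List Char → Bool
  | [] => false
  | c :: rest => (c = ' ' && headDash rest) || spaceDash rest

lemma headDash_iff (l : List Char) : headDash l = true ↔ ['-'] <+: l := by
  cases l with
  | nil => simp [headDash]
  | cons c rest => simp [headDash, List.cons_prefix_cons, eq_comm]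

lemma spaceDash_iff (l : List Char) : spaceDash l = true ↔ [' ', '-'] <:+: l := by
  induction l with
  | nil => simp [spaceDash]
  | cons c rest ih =>
      show ((decide (c = ' ') && headDash rest) || spaceDash rest) = true ↔ _
      rw [List.infix_cons_iff]
      simp only [Bool.or_eq_true, Bool.and_eq_true, decide_eq_true_iff, headDash_iff, ih,
        List.cons_prefix_cons]
      constructor
      · rintro (⟨h1, h2⟩ | h)
        · exact Or.inl ⟨h1.symm, h2⟩
        · exact Or.inr h
      · rintro (⟨h1, h2⟩ | h)
        · exact Or.inl ⟨h1.symm, h2⟩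
        · exact Or.inr h

lemma singleton_infix_iff (c : Char) (l : List Char) : [c] <:+: l ↔ c ∈ l := by
  constructor
  · rintro ⟨s, t, h⟩; subst h; simp
  · intro h
    rcases List.mem_iff_append.mp h with ⟨s, t, h⟩
    exact ⟨s, t, by simp [h]⟩

lemma isqB_spec (prev : Option Char) (l : List Char) :
    isqB_loop prev l =
      (l.any (fun c => (['|', '+', '"', '(', ')', '*', '~'] : List Char).contains c)
        || ((prev == none || prev == some ' ') && headDash l)
        || spaceDash l) := by
  induction l generalizing prev with
  | nil => simp [isqB_loop, headDash, spaceDash]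
  | cons c rest ih =>
      rw [isqB_loop]
      by_cases hop : (['|', '+', '"', '(', ')', '*', '~'] : List Char).contains c = true
      · rw [if_pos hop, List.any_cons, hop, Bool.true_or, Bool.true_or, Bool.true_or]
      · rw [if_neg hop]
        by_cases hdash : (c = '-' && (prev == none || prev == some ' ')) = true
        · rcases Bool.and_eq_true .. |>.mp hdash with ⟨h1, h2⟩
          have hh : headDash (c :: rest) = true := by
            simp only [decide_eq_true_iff] at h1; simp [headDash, h1]
          rw [if_pos hdash, hh, Bool.and_true, h2, Bool.or_true, Bool.true_or]
        · rw [if_neg hdash, ih]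
          have hc : ¬ (c = '-' ∧ ((prev == none || prev == some ' ') = true)) := by
            rintro ⟨x, y⟩
            exact hdash (by rw [x]; simp only [decide_true, Bool.true_and]; exact y)
          have hmid : ((prev == none || prev == some ' ') && headDash (c :: rest)) = false := by
            by_cases hp : (prev == none || prev == some ' ') = true
            · have hcc : ¬ c = '-' := fun x => hc ⟨x, hp⟩
              simp [headDash, hcc]
            · rw [(Bool.not_eq_true _).mp hp, Bool.false_and]
          have hprevc : ((some c == none || some c == some ' ') : Bool) = decide (c = ' ') := by
            rw [Bool.eq_iff_iff]; simp
          rw [List.any_cons, hmid, Bool.or_false, (Bool.not_eq_true _).mp hop, Bool.false_or,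
            hprevc]
          show _ = (_ || ((decide (c = ' ') && headDash rest) || spaceDash rest))
          cases rest.any (fun c => (['|', '+', '"', '(', ')', '*', '~'] : List Char).contains c) <;>
            cases (decide (c = ' ') && headDash rest) <;> cases spaceDash rest <;> simp

lemma isqA_loop_spec (query : String) (ops : List Char) :
    isqA_loop query ops =
      (ops.any (fun op => PySem.Str.isIn (String.ofList [op]) query)
        || PySem.Str.startswith query "-"
        || PySem.Str.isIn " -" query) := by
  induction ops with
  | nil =>
      rw [isqA_loop]
      by_cases h1 : PySem.Str.startswith query "-" = true
      · rw [if_pos h1, List.any_nil, Bool.false_or, h1, Bool.true_or]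
      · rw [if_neg h1]
        by_cases h2 : PySem.Str.isIn " -" query = true
        · rw [if_pos h2, h2, List.any_nil, Bool.false_or, Bool.or_true]
        · rw [if_neg h2, List.any_nil, (Bool.not_eq_true _).mp h1, (Bool.not_eq_true _).mp h2,
            Bool.false_or, Bool.or_false]
  | cons op rest ih =>
      rw [isqA_loop, List.any_cons]
      by_cases h : PySem.Str.isIn (String.ofList [op]) query = true
      · rw [if_pos h, h, Bool.true_or, Bool.true_or, Bool.true_or]
      · rw [if_neg h, ih, (Bool.not_eq_true _).mp h, Bool.false_or]

theorem isq_eq (query : String) : is_simple_query_string query = is_simple_query_string_alt query := by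
  unfold is_simple_query_string is_simple_query_string_alt
  rw [isqA_loop_spec, isqB_spec]
  have hops : (PySem.Str.replace "|+-\"()*~" "-" "").toList = ['|', '+', '"', '(', ')', '*', '~'] := by decide
  rw [hops, Bool.eq_iff_iff]
  have hsw : PySem.Str.startswith query "-" = headDash query.toList := by
    rw [Bool.eq_iff_iff, PySem.Str.startswith_eq, headDash_iff, PySem.Chars.startswith_iff]
    have : ("-" : String).toList = ['-'] := by decide
    rw [this]
  have hsd : PySem.Str.isIn " -" query = spaceDash query.toList := by
    rw [Bool.eq_iff_iff, spaceDash_iff, PySem.Str.isIn_iff_infix]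
    have : (" -" : String).toList = [' ', '-'] := by decide
    rw [this]
  have hone : ∀ op : Char, PySem.Str.isIn (String.ofList [op]) query = query.toList.contains op := by
    intro op
    rw [Bool.eq_iff_iff, PySem.Str.isIn_iff_infix]
    have : (String.ofList [op]).toList = [op] := by simp
    rw [this, singleton_infix_iff]
    simp
  simp only [hsw, hsd, hone, Bool.or_eq_true, List.any_eq_true, List.contains_eq_mem,
    Bool.and_eq_true]
  constructor
  · rintro ((⟨op, hop, hin⟩ | hh) | hs)
    · left; left
      refine ⟨op, ?_, by simpa using hop⟩
      simpa using hin
    · left; right; exact ⟨by simp, hh⟩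
    · right; exact hs
  · rintro ((⟨c, hc, hop⟩ | ⟨_, hh⟩) | hs)
    · left; left
      refine ⟨c, by simpa using hop, by simpa using hc⟩
    · left; right; exact hh
    · right; exact hs

-- ===== VERDICT (by name: the statement is the Claim_ definition above) =====
theorem is_simple_query_string_spec : Claim_equal_is_simple_query_string := by
  intro query _
  unfold Spec_is_simple_query_string
  exact isq_eq query
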